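-- pv_equiv track=rewrite | github.com/yannickloth/W33-Theory | tools/witting_pair_phase_symplectic.py | build_adjacency_f3
-- ===== SOURCE A (Python) =====
-- def omega_symp(x, y):
--     return (x[0] * y[2] - x[2] * y[0] + x[1] * y[3] - x[3] * y[1]) % 3
--
-- def build_adjacency_f3(points):
--     n = len(points)
--     adj = [set() for _ in range(n)]
--     for i in range(n):
--         for j in range(i + 1, n):
--             if omega_symp(points[i], points[j]) == 0:
--                 adj[i].add(j)
--                 adj[j].add(i)
--     return adj
-- ===== SOURCE B (Python) =====
-- def build_adjacency_f3(points):
--     # Bucket points by coordinate residues mod 3 (at most 81 classes): the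
--     # symplectic form mod 3 depends only on the classes, so compatibility is
--     # tested once per (point, class) rather than once per pair of points.
--     n = len(points)
--     cls = [(p[0] % 3, p[1] % 3, p[2] % 3, p[3] % 3) for p in points]
--     classes = list(dict.fromkeys(cls))
--     base = {c: [] for c in classes}
--     for j in range(n):
--         d = cls[j]
--         for c in classes:
--             if (c[0] * d[2] - c[2] * d[0] + c[1] * d[3] - c[3] * d[1]) % 3 == 0:
--                 base[c].append(j)
--     return [set(j for j in base[c] if j != i) for i, c in enumerate(cls)]
-- ===== Notes on version B (the rewrite author's own statement) =====
-- stated objective: alternative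
-- what changed: Instead of testing the symplectic form on every pair of points, B buckets points by their 4-tuple of residues mod 3 (at most 81 classes), computes one shared neighbour list per class with a per-(point,class) test, and emits each point's set from its class's list.
-- outside the precondition, e.g. on build_adjacency_f3([[1]]): A returns [set()], B raises IndexError
import Mathlib
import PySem

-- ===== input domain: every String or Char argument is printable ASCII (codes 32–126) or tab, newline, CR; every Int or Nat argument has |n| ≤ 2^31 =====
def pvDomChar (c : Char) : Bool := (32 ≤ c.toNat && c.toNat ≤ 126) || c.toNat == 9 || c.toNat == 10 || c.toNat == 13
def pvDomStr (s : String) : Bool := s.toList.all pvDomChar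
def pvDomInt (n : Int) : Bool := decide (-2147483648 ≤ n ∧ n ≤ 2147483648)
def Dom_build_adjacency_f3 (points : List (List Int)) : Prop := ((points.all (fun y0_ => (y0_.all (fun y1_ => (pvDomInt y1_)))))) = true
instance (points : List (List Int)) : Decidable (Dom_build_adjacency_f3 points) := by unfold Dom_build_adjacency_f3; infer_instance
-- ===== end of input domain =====

-- B replaces A's per-pair symplectic test by bucketing points into the ≤ 81 residue classes
-- mod 3 and computing one shared neighbour list per class (objective: alternative).

-- ===== PORT A =====
def omega_symp (x y : List Int) : Int :=
  PySem.Int.mod (PySem.List.pyGetD x 0 0 * PySem.List.pyGetD y 2 0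
    - PySem.List.pyGetD x 2 0 * PySem.List.pyGetD y 0 0
    + PySem.List.pyGetD x 1 0 * PySem.List.pyGetD y 3 0
    - PySem.List.pyGetD x 3 0 * PySem.List.pyGetD y 1 0) 3

-- range(n) / range(i+1, n) become List.range n / List.range' (i+1) (n-(i+1)) over Nat:
-- Python's loop indices here are always ≥ 0, and they are cast to Int (Int.ofNat) where
-- stored as set elements or used to index, which is exact for nonnegative indices.
def build_adjacency_f3 (points : List (List Int)) : List (List Int) :=
  let n := points.length
  let adj : List (PySem.Set Int) := (List.range n).map (fun _ => PySem.Set.ofList [])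
  (List.range n).foldl (fun adj i =>
    (List.range' (i + 1) (n - (i + 1))).foldl (fun adj j =>
      if omega_symp (PySem.List.pyGetD points (Int.ofNat i) [])
          (PySem.List.pyGetD points (Int.ofNat j) []) == 0 then
        (adj.modify i (fun s => PySem.Set.add s (Int.ofNat j))).modify j
          (fun s => PySem.Set.add s (Int.ofNat i))
      else adj) adj) adj

-- ===== PORT B =====
def cls_of (p : List Int) : Int × Int × Int × Int :=
  (PySem.Int.mod (PySem.List.pyGetD p 0 0) 3, PySem.Int.mod (PySem.List.pyGetD p 1 0) 3,
   PySem.Int.mod (PySem.List.pyGetD p 2 0) 3, PySem.Int.mod (PySem.List.pyGetD p 3 0) 3)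

def omega_cls (c d : Int × Int × Int × Int) : Int :=
  PySem.Int.mod (c.1 * d.2.2.1 - c.2.2.1 * d.1 + c.2.1 * d.2.2.2 - c.2.2.2 * d.2.1) 3

def build_adjacency_f3_alt (points : List (List Int)) : List (List Int) :=
  let n := points.length
  let cls := points.map cls_of
  let classes := PySem.List.dedup cls            -- list(dict.fromkeys(cls))
  let base : PySem.Dict (Int × Int × Int × Int) (List Int) :=
    classes.foldl (fun b c => b.insert c []) PySem.Dict.empty    -- {c: [] for c in classes}
  let base := (List.range n).foldl (fun base j =>
    let d := PySem.List.pyGetD cls (Int.ofNat j) (0, 0, 0, 0)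
    classes.foldl (fun base c =>
      if omega_cls c d == 0 then base.modify c [] (fun l => l ++ [Int.ofNat j])
      else base) base) base
  (PySem.List.enumerate cls).map (fun p =>
    PySem.Set.ofList ((PySem.Dict.getD base p.2 []).filter (fun j => j != p.1)))

-- ===== PRECONDITION & SPEC =====
-- Pre_ excludes inputs containing a point with fewer than 4 coordinates: Python A raises
-- IndexError on them whenever there are at least two points (and returns only in the
-- degenerate 0- or 1-point case, where no pair is formed), while B always raises there.
def Pre_build_adjacency_f3 (points : List (List Int)) : Prop := ∀ p ∈ points, 4 ≤ p.length
instance (points : List (List Int)) : Decidable (Pre_build_adjacency_f3 points) := by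
  unfold Pre_build_adjacency_f3; infer_instance

def pvWitness_build_adjacency_f3 : List (List Int) :=
  [[1, 0, 0, 0], [2, 0, 0, 0], [0, 1, 0, 0]]

def Spec_build_adjacency_f3 (points : List (List Int)) (out : List (List Int)) : Prop :=
  out = build_adjacency_f3_alt points
instance (points : List (List Int)) (out : List (List Int)) :
    Decidable (Spec_build_adjacency_f3 points out) := by
  unfold Spec_build_adjacency_f3; infer_instance

-- ===== CLAIM (what is proved, stated in full; the proofs are below) =====
def Claim_equal_build_adjacency_f3 : Prop :=
  ∀ (points : List (List Int)), Dom_build_adjacency_f3 points →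
    Pre_build_adjacency_f3 points →
    Spec_build_adjacency_f3 points (build_adjacency_f3 points)

-- ===== LEMMAS AND PROOFS =====

-- Both ports are shown to equal the same canonical form: point k's neighbour list is the
-- increasing list of all j ≠ k with vanishing symplectic form mod 3 against point k.
def okA (points : List (List Int)) (i j : Nat) : Bool :=
  omega_symp (points.getD i []) (points.getD j []) == 0

def nbr (points : List (List Int)) (k : Nat) : List Int :=
  ((List.range points.length).filter (fun j => decide (j ≠ k) && okA points k j)).map Int.ofNat

-- ---- shared small lemmas ----
lemma modify_map_range (n i : Nat) (f : Nat → List Int) (g : List Int → List Int) :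
    ((List.range n).map f).modify i g =
      (List.range n).map (fun k => if i = k then g (f k) else f k) := by
  apply List.ext_getElem
  · simp
  · intro j h1 h2
    simp [List.getElem_modify]

lemma add_fresh (s : List Int) (x : Int) (h : ¬ x ∈ s) :
    PySem.Set.add s x = s ++ [x] := by
  simp [PySem.Set.add, h]

lemma notmem_map_ofNat {l : List Nat} {b j : Nat} (hb : ∀ x ∈ l, x < b) (hj : b ≤ j) :
    ¬ (Int.ofNat j) ∈ l.map Int.ofNat := by
  simp only [List.mem_map, Int.ofNat_eq_natCast, Nat.cast_inj]
  rintro ⟨x, hx, rfl⟩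
  exact absurd (hb x hx) (by omega)

lemma okA_symm (points : List (List Int)) (i j : Nat) :
    okA points i j = okA points j i := by
  unfold okA
  set x := points.getD i []
  set y := points.getD j []
  rw [Bool.eq_iff_iff]
  simp only [beq_iff_eq, omega_symp, PySem.Int.mod_eq_zero_iff_dvd]
  set a0 := PySem.List.pyGetD x 0 0
  set a1 := PySem.List.pyGetD x 1 0
  set a2 := PySem.List.pyGetD x 2 0
  set a3 := PySem.List.pyGetD x 3 0
  set b0 := PySem.List.pyGetD y 0 0
  set b1 := PySem.List.pyGetD y 1 0
  set b2 := PySem.List.pyGetD y 2 0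
  set b3 := PySem.List.pyGetD y 3 0
  have e : b0 * a2 - b2 * a0 + b1 * a3 - b3 * a1
      = -(a0 * b2 - a2 * b0 + a1 * b3 - a3 * b1) := by ring
  rw [e, dvd_neg]

-- the class pairing computes the original symplectic form mod 3
lemma omega_cls_eq (x y : List Int) :
    omega_cls (cls_of x) (cls_of y) = omega_symp x y := by
  unfold omega_cls cls_of omega_symp
  have h3 : (0 : Int) < 3 := by norm_num
  simp only [PySem.Int.mod_eq_emod_of_pos h3]
  set a0 := PySem.List.pyGetD x 0 0
  set a1 := PySem.List.pyGetD x 1 0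
  set a2 := PySem.List.pyGetD x 2 0
  set a3 := PySem.List.pyGetD x 3 0
  set b0 := PySem.List.pyGetD y 0 0
  set b1 := PySem.List.pyGetD y 1 0
  set b2 := PySem.List.pyGetD y 2 0
  set b3 := PySem.List.pyGetD y 3 0
  have e : ∀ u : Int, Int.ModEq 3 (u % 3) u := fun u => Int.emod_emod_of_dvd u dvd_rfl
  exact (((((e a0).mul (e b2)).sub ((e a2).mul (e b0))).add
    ((e a1).mul (e b3))).sub ((e a3).mul (e b1)))

-- ---- A side: invariant of the nested pair loop ----
-- left (already complete) part of A's adj[k] after m outer iterations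
def partialL (points : List (List Int)) (m k : Nat) : List Int :=
  ((List.range m).filter (fun i => okA points i k)).map Int.ofNat

def stateF (points : List (List Int)) (m k : Nat) : List Int :=
  if k < m then nbr points k else partialL points m k

def istate (points : List (List Int)) (m t k : Nat) : List Int :=
  if k < m then nbr points k
  else if k = m then
    partialL points m m ++ ((List.range' (m + 1) t).filter (fun j => okA points m j)).map Int.ofNat
  else if k < m + 1 + t then partialL points (m + 1) k
  else partialL points m k

lemma cond_eq (points : List (List Int)) (a b : Nat) :
    (omega_symp (PySem.List.pyGetD points (Int.ofNat a) [])
      (PySem.List.pyGetD points (Int.ofNat b) []) == 0) = okA points a b := by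
  simp only [okA, Int.ofNat_eq_natCast, PySem.List.pyGetD_natCast]

lemma notmem_partialL (points : List (List Int)) {m : Nat} (k : Nat) {j : Nat} (h : m ≤ j) :
    ¬ (Int.ofNat j) ∈ partialL points m k :=
  notmem_map_ofNat (fun _ hx => List.mem_range.mp (List.mem_filter.mp hx).1) h

lemma notmem_rfilter (points : List (List Int)) {m t j : Nat} (h : m + 1 + t ≤ j) :
    ¬ (Int.ofNat j) ∈ ((List.range' (m + 1) t).filter (fun j' => okA points m j')).map Int.ofNat :=
  notmem_map_ofNat (fun _ hx => by
    have := List.mem_range'_1.mp (List.mem_filter.mp hx).1; omega) h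

lemma istate_untouched (points : List (List Int)) (m t k : Nat)
    (hmk : k ≠ m) (hjk : k ≠ m + 1 + t) :
    istate points m (t + 1) k = istate points m t k := by
  unfold istate
  by_cases h1 : k < m
  · simp [h1]
  · by_cases h4 : k < m + 1 + t
    · simp [h1, hmk, h4, show k < m + 1 + (t + 1) by omega]
    · simp [h1, hmk, h4, show ¬ k < m + 1 + (t + 1) by omega]

lemma istate_stable (points : List (List Int)) (m t : Nat)
    (hok : okA points m (m + 1 + t) = false) (k : Nat) :
    istate points m (t + 1) k = istate points m t k := by
  by_cases h2 : k = m
  · subst h2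
    unfold istate
    simp only [lt_irrefl, if_false, if_true]
    rw [List.range'_concat, List.filter_append, one_mul]
    simp [hok]
  · by_cases h3 : k = m + 1 + t
    · subst h3
      unfold istate
      simp only [show ¬ m + 1 + t < m by omega, show ¬ m + 1 + t = m by omega,
        show m + 1 + t < m + 1 + (t + 1) by omega, show ¬ m + 1 + t < m + 1 + t by omega,
        if_false, if_true]
      unfold partialL
      rw [List.range_succ, List.filter_append]
      simp [hok]
    · exact istate_untouched points m t k h2 h3

lemma istate_step_self (points : List (List Int)) (m t : Nat)
    (hok : okA points m (m + 1 + t) = true) :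
    istate points m (t + 1) m = PySem.Set.add (istate points m t m) (Int.ofNat (m + 1 + t)) := by
  unfold istate
  simp only [lt_irrefl, if_false, if_true]
  rw [add_fresh _ _ (by
    rw [List.mem_append]
    push Not
    exact ⟨notmem_partialL points m (by omega), notmem_rfilter points (by omega)⟩)]
  rw [List.range'_concat, List.filter_append, List.map_append, List.append_assoc, one_mul]
  congr 2
  simp [hok]

lemma istate_step_j (points : List (List Int)) (m t : Nat)
    (hok : okA points m (m + 1 + t) = true) :
    istate points m (t + 1) (m + 1 + t) =
      PySem.Set.add (istate points m t (m + 1 + t)) (Int.ofNat m) := by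
  unfold istate
  simp only [show ¬ m + 1 + t < m by omega, show ¬ m + 1 + t = m by omega,
    show m + 1 + t < m + 1 + (t + 1) by omega, show ¬ m + 1 + t < m + 1 + t by omega,
    if_false, if_true]
  rw [add_fresh _ _ (notmem_partialL points _ (by omega))]
  unfold partialL
  rw [List.range_succ, List.filter_append, List.map_append]
  congr 1
  simp [hok]

lemma inner_fold (points : List (List Int)) (m t : Nat) :
    (List.range' (m + 1) t).foldl (fun adj j =>
      if omega_symp (PySem.List.pyGetD points (Int.ofNat m) [])
          (PySem.List.pyGetD points (Int.ofNat j) []) == 0 then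
        (adj.modify m (fun s => PySem.Set.add s (Int.ofNat j))).modify j
          (fun s => PySem.Set.add s (Int.ofNat m))
      else adj)
      ((List.range points.length).map (stateF points m)) =
    (List.range points.length).map (istate points m t) := by
  induction t with
  | zero =>
    simp only [List.range'_zero, List.foldl_nil]
    apply List.map_congr_left
    intro k hk
    unfold stateF istate
    by_cases h1 : k < m
    · simp [h1]
    · by_cases h2 : k = m
      · simp [h2]
      · simp [h1, h2, show ¬ k < m + 1 + 0 by omega]
  | succ t ih =>
    rw [List.range'_concat, List.foldl_append, ih]
    simp only [List.foldl_cons, List.foldl_nil, one_mul]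
    rw [cond_eq]
    by_cases hok : okA points m (m + 1 + t) = true
    · rw [if_pos hok, modify_map_range, modify_map_range]
      apply List.map_congr_left
      intro k hk
      by_cases h3 : m + 1 + t = k
      · rw [if_pos h3, if_neg (by omega)]
        subst h3
        exact (istate_step_j points m t hok).symm
      · rw [if_neg h3]
        by_cases h2 : m = k
        · rw [if_pos h2]
          subst h2
          exact (istate_step_self points m t hok).symm
        · rw [if_neg h2]
          exact (istate_untouched points m t k (fun h => h2 h.symm) (fun h => h3 h.symm)).symm
    · rw [if_neg (by simpa using hok)]
      apply List.map_congr_left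
      intro k _
      exact (istate_stable points m t (by simpa using hok) k).symm

lemma istate_full (points : List (List Int)) (m : Nat) (k : Nat) (hk : k < points.length) :
    istate points m (points.length - (m + 1)) k = stateF points (m + 1) k := by
  by_cases h1 : k < m
  · unfold istate stateF
    simp [h1, show k < m + 1 by omega]
  · by_cases h2 : k = m
    · subst h2
      unfold istate stateF
      simp only [lt_irrefl, if_false, if_true, show k < k + 1 by omega]
      unfold nbr partialL
      conv_rhs =>
        rw [List.range_eq_range', show points.length = (k + 1) + (points.length - (k + 1)) by omega,
          ← List.range'_append (s := 0) (m := k + 1) (n := points.length - (k + 1)) (step := 1)]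
      rw [List.filter_append, List.map_append, ← List.range_eq_range',
        show (0 + 1 * (k + 1) : Nat) = k + 1 by omega]
      congr 1
      · rw [List.range_succ, List.filter_append]
        have hpk : (decide (k ≠ k) && okA points k k) = false := by simp
        simp only [List.filter_cons, List.filter_nil, hpk, Bool.false_eq_true, if_false,
          List.append_nil]
        congr 1
        apply List.filter_congr
        intro i hi
        rw [List.mem_range] at hi
        simp [show i ≠ k by omega, okA_symm points i k]
      · congr 1
        apply List.filter_congr
        intro j hj
        rw [List.mem_range'_1] at hj
        simp [show j ≠ k by omega]
    · unfold istate stateF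
      simp [h1, h2, show k < m + 1 + (points.length - (m + 1)) by omega,
        show ¬ k < m + 1 by omega]

lemma outer_fold (points : List (List Int)) (m : Nat) (hm : m ≤ points.length) :
    (List.range m).foldl (fun adj i =>
      (List.range' (i + 1) (points.length - (i + 1))).foldl (fun adj j =>
        if omega_symp (PySem.List.pyGetD points (Int.ofNat i) [])
            (PySem.List.pyGetD points (Int.ofNat j) []) == 0 then
          (adj.modify i (fun s => PySem.Set.add s (Int.ofNat j))).modify j
            (fun s => PySem.Set.add s (Int.ofNat i))
        else adj) adj)
      ((List.range points.length).map (fun _ => PySem.Set.ofList []))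
    = (List.range points.length).map (stateF points m) := by
  induction m with
  | zero =>
    simp only [List.range_zero, List.foldl_nil]
    apply List.map_congr_left
    intro k _
    unfold stateF partialL
    simp [PySem.Set.ofList]
  | succ m ih =>
    rw [List.range_succ, List.foldl_append, ih (by omega), List.foldl_cons, List.foldl_nil]
    rw [inner_fold points m (points.length - (m + 1))]
    apply List.map_congr_left
    intro k hk
    rw [List.mem_range] at hk
    exact istate_full points m k hk

lemma portA_char (points : List (List Int)) :
    build_adjacency_f3 points = (List.range points.length).map (nbr points) := by
  unfold build_adjacency_f3
  rw [outer_fold points points.length le_rfl]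
  apply List.map_congr_left
  intro k hk
  rw [List.mem_range] at hk
  unfold stateF
  rw [if_pos hk]

-- ---- B side: characterisation of the per-class dictionary ----
lemma getD_insert_nil {κ : Type} [BEq κ] [LawfulBEq κ] (cs : List κ)
    (b : PySem.Dict κ (List Int)) (h : ∀ c, b.getD c [] = []) (c : κ) :
    (cs.foldl (fun b c => b.insert c []) b).getD c [] = [] := by
  induction cs generalizing b with
  | nil => exact h c
  | cons c0 cs ih =>
    refine ih _ (fun c' => ?_)
    by_cases hc : c' = c0
    · subst hc; simp [PySem.Dict.getD_insert_self]
    · rw [PySem.Dict.getD_insert_of_ne _ _ _ hc]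
      exact h c'

lemma getD_foldl_modify_ite {κ : Type} [BEq κ] [LawfulBEq κ] [DecidableEq κ]
    (cs : List κ) (hnd : cs.Nodup) (P : κ → Bool) (v : Int) (c : κ) :
    ∀ (b : PySem.Dict κ (List Int)),
    (cs.foldl (fun b c' => if P c' then b.modify c' [] (fun l => l ++ [v]) else b) b).getD c []
      = if c ∈ cs ∧ P c = true then b.getD c [] ++ [v] else b.getD c [] := by
  induction cs with
  | nil => intro b; simp
  | cons c0 cs ih =>
    intro b
    have hnd' := hnd
    rw [List.nodup_cons] at hnd'
    simp only [List.foldl_cons]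
    rw [ih hnd'.2 _]
    by_cases hc0 : c = c0
    · subst hc0
      have hnotin : ¬ c ∈ cs := hnd'.1
      by_cases hp : P c = true
      · simp [hp, hnotin]
      · simp [hp, hnotin]
    · have : (c ∈ c0 :: cs ∧ P c = true) ↔ (c ∈ cs ∧ P c = true) := by
        simp [List.mem_cons, hc0]
      rw [if_congr this rfl rfl]
      by_cases hp0 : P c0 = true
      · simp [hp0, PySem.Dict.getD_modify, hc0]
      · simp [hp0]

lemma base_char (points : List (List Int)) (m : Nat) (c : Int × Int × Int × Int)
    (hc : c ∈ PySem.List.dedup (points.map cls_of)) :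
    ((List.range m).foldl (fun base j =>
        (PySem.List.dedup (points.map cls_of)).foldl (fun base c' =>
          if omega_cls c' (PySem.List.pyGetD (points.map cls_of) (Int.ofNat j) (0, 0, 0, 0)) == 0
          then base.modify c' [] (fun l => l ++ [Int.ofNat j]) else base) base)
      ((PySem.List.dedup (points.map cls_of)).foldl (fun b c => b.insert c [])
        PySem.Dict.empty)).getD c []
    = ((List.range m).filter (fun j =>
        omega_cls c (PySem.List.pyGetD (points.map cls_of) (Int.ofNat j) (0, 0, 0, 0)) == 0)).map
        Int.ofNat := by
  induction m with
  | zero =>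
    simp only [List.range_zero, List.foldl_nil, List.filter_nil, List.map_nil]
    exact getD_insert_nil _ _ (fun c' => by simp [PySem.Dict.getD]) c
  | succ m ih =>
    rw [List.range_succ, List.foldl_append, List.foldl_cons, List.foldl_nil,
      getD_foldl_modify_ite _ (PySem.List.nodup_dedup _) _ _ _ _, ih,
      List.filter_append, List.map_append]
    by_cases hp : (omega_cls c (PySem.List.pyGetD (points.map cls_of) (Int.ofNat m) (0, 0, 0, 0))
        == 0) = true
    · rw [if_pos ⟨hc, hp⟩]
      simp only [List.filter_cons, List.filter_nil, hp, if_true, List.map_cons, List.map_nil]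
    · rw [if_neg (fun h => hp h.2)]
      simp only [List.filter_cons, List.filter_nil, eq_false_of_ne_true hp, Bool.false_eq_true,
        if_false, List.map_nil, List.append_nil]

lemma portB_char (points : List (List Int)) :
    build_adjacency_f3_alt points = (List.range points.length).map (nbr points) := by
  unfold build_adjacency_f3_alt
  simp only []
  rw [PySem.List.enumerate_eq_map_pyRange (points.map cls_of) (0, 0, 0, 0)]
  rw [PySem.List.len_eq, List.length_map, PySem.List.pyRange_zero_natCast, List.map_map,
    List.map_map]
  apply List.map_congr_left
  intro k hk
  rw [List.mem_range] at hk
  simp only [Function.comp_apply]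
  have hcls : PySem.List.pyGetD (points.map cls_of) ((k : Nat) : Int) (0, 0, 0, 0)
      = cls_of (points.getD k []) := by
    rw [PySem.List.pyGetD_natCast,
      List.getD_eq_getElem _ _ (by simpa using hk), List.getElem_map,
      List.getD_eq_getElem _ _ hk]
  rw [hcls]
  have hmem : cls_of (points.getD k []) ∈ PySem.List.dedup (points.map cls_of) := by
    rw [PySem.List.mem_dedup]
    rw [List.getD_eq_getElem _ _ hk]
    exact List.mem_map_of_mem (points.getElem_mem hk)
  rw [base_char points points.length _ hmem]
  rw [List.filter_map, List.filter_filter]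
  rw [PySem.Set.ofList_eq_self_of_nodup]
  · unfold nbr
    congr 1
    apply List.filter_congr
    intro j hj
    rw [List.mem_range] at hj
    have hclsj : PySem.List.pyGetD (points.map cls_of) (Int.ofNat j) (0, 0, 0, 0)
        = cls_of (points.getD j []) := by
      rw [Int.ofNat_eq_natCast, PySem.List.pyGetD_natCast,
        List.getD_eq_getElem _ _ (by simpa using hj), List.getElem_map,
        List.getD_eq_getElem _ _ hj]
    simp only [Function.comp_apply, hclsj, omega_cls_eq, okA]
    have : ((Int.ofNat j : Int) != ((k : Nat) : Int)) = decide (j ≠ k) := by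
      by_cases h : j = k <;> simp [h, bne, Int.ofNat_eq_natCast]
    rw [this, Bool.and_comm]
  · refine List.Nodup.map (fun a b h => Int.ofNat.inj h) (List.Nodup.filter _ ?_)
    exact List.nodup_range

-- ===== VERDICT (by name: the statement is the Claim_ definition above) =====
theorem build_adjacency_f3_spec : Claim_equal_build_adjacency_f3 := by
  intro points _ _
  unfold Spec_build_adjacency_f3
  rw [portA_char, portB_char]
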